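-- pv_equiv track=rewrite | github.com/canonical/opencti-operator | scripts/gen_connector_charm.py | sort_config
-- ===== SOURCE A (Python) =====
-- import operator
--
-- def sort_config(options: dict) -> dict:
--     """Sorting configuration options, first mandatory, then optional, alphabetically."""
--     mandatory = {k: v for k, v in options.items() if not v["optional"] and "default" not in v}
--     mandatory_with_default = {
--         k: v for k, v in options.items() if not v["optional"] and "default" in v
--     }
--     optional = {
--         k: v for k, v in options.items() if k not in mandatory and k not in mandatory_with_default
--     }
--     sorted_options = {}
--     sorted_options.update(sorted(mandatory.items(), key=operator.itemgetter(0)))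
--     sorted_options.update(sorted(mandatory_with_default.items(), key=operator.itemgetter(0)))
--     sorted_options.update(sorted(optional.items(), key=operator.itemgetter(0)))
--     return sorted_options
-- ===== SOURCE B (Python) =====
-- def sort_config(options: dict) -> dict:
--     """Sorting configuration options, first mandatory, then optional, alphabetically."""
--
--     def rank(v):
--         if not v["optional"]:
--             return 0 if "default" not in v else 1
--         return 2
--
--     return dict(sorted(options.items(), key=lambda kv: (rank(kv[1]), kv[0])))
-- ===== Notes on version B (the rewrite author's own statement) =====
-- stated objective: simpler
-- what changed: Replaces the three partition dict-comprehensions, three separate sorts and three dict updates by a rank function and ONE sort with the composite key (rank, name), building the result dict in a single pass.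
import Mathlib
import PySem

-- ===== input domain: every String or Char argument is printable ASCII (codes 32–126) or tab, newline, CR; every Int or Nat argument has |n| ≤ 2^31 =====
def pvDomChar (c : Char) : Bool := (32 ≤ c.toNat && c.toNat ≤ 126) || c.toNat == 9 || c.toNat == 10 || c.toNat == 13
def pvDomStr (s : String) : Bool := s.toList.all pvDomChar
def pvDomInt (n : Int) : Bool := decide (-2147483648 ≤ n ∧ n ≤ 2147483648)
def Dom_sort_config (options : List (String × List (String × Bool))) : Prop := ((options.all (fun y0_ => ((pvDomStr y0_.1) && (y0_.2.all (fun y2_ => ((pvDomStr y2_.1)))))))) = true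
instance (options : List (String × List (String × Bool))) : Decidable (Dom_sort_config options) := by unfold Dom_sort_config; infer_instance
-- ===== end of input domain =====

-- B replaces A's three partition dicts, three sorts and three dict updates by ONE sort with the composite key (rank, name).

-- ===== PORT A =====
-- A-side helpers: the two comprehension conditions of A, named
def pvP0 (kv : String × List (String × Bool)) : Bool :=
  !((PySem.Dict.mk kv.2).getD "optional" false) && !((PySem.Dict.mk kv.2).contains "default")
def pvP1 (kv : String × List (String × Bool)) : Bool :=
  !((PySem.Dict.mk kv.2).getD "optional" false) && (PySem.Dict.mk kv.2).contains "default"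

def sort_config (options : List (String × List (String × Bool))) : List (String × List (String × Bool)) :=
  let mandatory := PySem.Dict.ofList (options.filter pvP0)
  let mandatory_with_default := PySem.Dict.ofList (options.filter pvP1)
  let optional := PySem.Dict.ofList (options.filter (fun kv =>
    !(mandatory.contains kv.1) && !(mandatory_with_default.contains kv.1)))
  let sorted_options : PySem.Dict String (List (String × Bool)) := PySem.Dict.empty
  let sorted_options := sorted_options.update (PySem.List.sorted mandatory.items (fun kv => kv.1) false)
  let sorted_options := sorted_options.update (PySem.List.sorted mandatory_with_default.items (fun kv => kv.1) false)
  let sorted_options := sorted_options.update (PySem.List.sorted optional.items (fun kv => kv.1) false)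
  sorted_options.items

-- ===== PORT B =====
-- Source B's inner helper `rank`
def pvRank (v : List (String × Bool)) : Int :=
  if !((PySem.Dict.mk v).getD "optional" false) then
    (if !((PySem.Dict.mk v).contains "default") then 0 else 1)
  else 2

def sort_config_alt (options : List (String × List (String × Bool))) : List (String × List (String × Bool)) :=
  (PySem.Dict.ofList (PySem.List.sorted2 options (fun kv => pvRank kv.2) (fun kv => kv.1) false)).items

-- ===== PRECONDITION & SPEC =====
-- Pre_ excludes association lists with duplicate outer or inner keys (those do not represent the
-- Python dicts A receives; lookup and re-insertion order on them would be accidental) and values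
-- missing the "optional" key, on which A raises KeyError.
def Pre_sort_config (options : List (String × List (String × Bool))) : Prop :=
  (options.map Prod.fst).Nodup ∧
    ∀ kv ∈ options, (kv.2.map Prod.fst).Nodup ∧ "optional" ∈ kv.2.map Prod.fst
instance (options : List (String × List (String × Bool))) : Decidable (Pre_sort_config options) := by
  unfold Pre_sort_config; infer_instance

def pvWitness_sort_config : (List (String × List (String × Bool))) :=
  [("url", [("optional", false)]), ("token", [("optional", true), ("default", true)])]

def Spec_sort_config (options : List (String × List (String × Bool))) (out : List (String × List (String × Bool))) : Prop := out = sort_config_alt options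
instance (options : List (String × List (String × Bool))) (out : List (String × List (String × Bool))) : Decidable (Spec_sort_config options out) := by unfold Spec_sort_config; infer_instance

-- ===== CLAIM (what is proved, stated in full; the proofs are below) =====
def Claim_equal_sort_config : Prop := ∀ (options : List (String × List (String × Bool))), Dom_sort_config options → Pre_sort_config options → Spec_sort_config options (sort_config options)

-- ===== LEMMAS AND PROOFS =====

-- the Boolean lexicographic "less-than" that sorted2 sorts by
def pvLex {α : Type} (k1 : α → Int) (k2 : α → String) (a b : α) : Bool :=
  decide (k1 a < k1 b) || !decide (k1 b < k1 a) && decide (k2 a < k2 b)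

theorem pvLex_true_iff {α : Type} (k1 : α → Int) (k2 : α → String) (a b : α) :
    pvLex k1 k2 a b = true ↔ (k1 a < k1 b ∨ (k1 a = k1 b ∧ k2 a < k2 b)) := by
  simp only [pvLex, Bool.or_eq_true, Bool.and_eq_true, Bool.not_eq_true', decide_eq_true_eq,
    decide_eq_false_iff_not]
  constructor
  · rintro (h | ⟨h1, h2⟩)
    · exact Or.inl h
    · rcases lt_or_eq_of_le (not_lt.mp h1) with h | h
      · exact Or.inl h
      · exact Or.inr ⟨h, h2⟩
  · rintro (h | ⟨h1, h2⟩)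
    · exact Or.inl h
    · exact Or.inr ⟨by omega, h2⟩

theorem pvLex_false_iff {α : Type} (k1 : α → Int) (k2 : α → String) (a b : α) :
    pvLex k1 k2 a b = false ↔ (¬ k1 a < k1 b ∧ (k1 a = k1 b → ¬ k2 a < k2 b)) := by
  rw [← Bool.not_eq_true, pvLex_true_iff]
  constructor
  · intro h
    exact ⟨fun h1 => h (Or.inl h1), fun h1 h2 => h (Or.inr ⟨h1, h2⟩)⟩
  · rintro ⟨h1, h2⟩ (h | ⟨ha, hb⟩)
    · exact h1 h
    · exact h2 ha hb

theorem pvLex_asymm {α : Type} (k1 : α → Int) (k2 : α → String) (a b : α)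
    (h : pvLex k1 k2 a b = true) : pvLex k1 k2 b a = false := by
  rw [pvLex_true_iff] at h
  rw [pvLex_false_iff]
  rcases h with h | ⟨h1, h2⟩
  · exact ⟨by omega, fun he => by omega⟩
  · exact ⟨by omega, fun _ => not_lt_of_gt h2⟩

theorem pvLex_step {α : Type} (k1 : α → Int) (k2 : α → String) (x y z : α)
    (h1 : pvLex k1 k2 x y = true) (h2 : pvLex k1 k2 z y = false) : pvLex k1 k2 z x = false := by
  rw [pvLex_true_iff] at h1
  rw [pvLex_false_iff] at h2 ⊢
  obtain ⟨h2a, h2b⟩ := h2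
  rcases h1 with h | ⟨he, hk⟩
  · exact ⟨by omega, fun hzx => by omega⟩
  · refine ⟨by omega, fun hzx => ?_⟩
    have := h2b (by omega)
    exact fun hlt => this (lt_trans hlt hk)

theorem pvInsertBy_pairwise {α : Type} (k1 : α → Int) (k2 : α → String) (x : α) :
    ∀ acc : List α, acc.Pairwise (fun a b => pvLex k1 k2 b a = false) →
      (PySem.List.insertBy (pvLex k1 k2) x acc).Pairwise (fun a b => pvLex k1 k2 b a = false) := by
  intro acc
  induction acc with
  | nil => intro _; simp [PySem.List.insertBy]
  | cons y ys ih =>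
    intro hp
    rw [List.pairwise_cons] at hp
    obtain ⟨hy, hys⟩ := hp
    by_cases hb : pvLex k1 k2 x y = true
    · simp only [PySem.List.insertBy, hb, if_true]
      refine List.Pairwise.cons ?_ (List.Pairwise.cons hy hys)
      intro z hz
      rcases List.mem_cons.mp hz with rfl | hz
      · exact pvLex_asymm _ _ _ _ hb
      · exact pvLex_step _ _ _ _ _ hb (hy z hz)
    · have hb' : pvLex k1 k2 x y = false := Bool.eq_false_iff.mpr hb
      simp only [PySem.List.insertBy, hb]
      refine List.Pairwise.cons ?_ (ih hys)
      intro z hz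
      rcases (PySem.List.mem_insertBy _ _ _ _).mp hz with rfl | hz
      · exact hb'
      · exact hy z hz

theorem pvFoldl_pairwise {α : Type} (k1 : α → Int) (k2 : α → String) :
    ∀ (xs acc : List α), acc.Pairwise (fun a b => pvLex k1 k2 b a = false) →
      (xs.foldl (fun acc x => PySem.List.insertBy (pvLex k1 k2) x acc) acc).Pairwise
        (fun a b => pvLex k1 k2 b a = false) := by
  intro xs
  induction xs with
  | nil => intro acc h; simpa using h
  | cons x t ih =>
    intro acc h
    exact ih _ (pvInsertBy_pairwise _ _ _ _ h)

-- uniqueness: any strictly lex-increasing rearrangement of xs IS sorted2 xs (k2 injective on xs)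
theorem pvSorted2_eq {α : Type} (xs ys : List α) (k1 : α → Int) (k2 : α → String)
    (hperm : ys.Perm xs)
    (hpw : ys.Pairwise (fun a b => pvLex k1 k2 a b = true))
    (hinj : ∀ a ∈ xs, ∀ b ∈ xs, k2 a = k2 b → a = b) :
    PySem.List.sorted2 xs k1 k2 false = ys := by
  have hunf : PySem.List.sorted2 xs k1 k2 false =
      xs.foldl (fun acc x => PySem.List.insertBy (pvLex k1 k2) x acc) [] := rfl
  refine List.Perm.eq_of_pairwise (le := fun a b => pvLex k1 k2 b a = false) ?_ ?_ ?_ ?_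
  · intro a b ha hb hab hba
    have ha' : a ∈ xs := ((PySem.List.sorted2_perm xs k1 k2 false).mem_iff).mp ha
    have hb' : b ∈ xs := (hperm.mem_iff).mp hb
    rw [pvLex_false_iff] at hab hba
    refine hinj a ha' b hb' ?_
    have h1 : k1 a = k1 b := by omega
    exact le_antisymm (not_lt.mp (hab.2 h1.symm)) (not_lt.mp (hba.2 h1))
  · rw [hunf]; exact pvFoldl_pairwise _ _ _ _ (List.Pairwise.nil)
  · exact hpw.imp (fun h => pvLex_asymm _ _ _ _ h)
  · exact (PySem.List.sorted2_perm xs k1 k2 false).trans hperm.symm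

-- items of ofList over a nodup-keys pair list is the list itself
theorem pvOfList_items (l : List (String × List (String × Bool))) (h : (l.map Prod.fst).Nodup) :
    (PySem.Dict.ofList l).items = l := by
  have := PySem.Dict.items_foldl_insert_fresh l Prod.fst Prod.snd (PySem.Dict.empty)
    (by intro a _; simp) h
  simpa [PySem.Dict.ofList, PySem.Dict.update, PySem.Dict.empty] using this

theorem pvUpdate_items (d : PySem.Dict String (List (String × Bool)))
    (l : List (String × List (String × Bool)))
    (hfresh : ∀ p ∈ l, d.contains p.1 = false) (hl : (l.map Prod.fst).Nodup) :
    (d.update l).items = d.items ++ l := by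
  have := PySem.Dict.items_foldl_insert_fresh l Prod.fst Prod.snd d hfresh hl
  simpa [PySem.Dict.update] using this

-- A's three predicates are mutually exclusive and exhaustive in rank terms
theorem pvRank_p0 (kv : String × List (String × Bool)) (h : pvP0 kv = true) : pvRank kv.2 = 0 := by
  simp only [pvP0, Bool.and_eq_true, Bool.not_eq_true'] at h
  simp [pvRank, h.1, h.2]

theorem pvRank_p1 (kv : String × List (String × Bool)) (h : pvP1 kv = true) : pvRank kv.2 = 1 := by
  simp only [pvP1, Bool.and_eq_true, Bool.not_eq_true'] at h
  simp [pvRank, h.1, h.2]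

theorem pvRank_p2 (kv : String × List (String × Bool))
    (h : (!(pvP0 kv) && !(pvP1 kv)) = true) : pvRank kv.2 = 2 := by
  cases hg : (PySem.Dict.mk kv.2).getD "optional" false with
  | true => simp [pvRank, hg]
  | false =>
    cases hc : (PySem.Dict.mk kv.2).contains "default" <;>
      simp [pvP0, pvP1, hg, hc] at h

theorem pvNot_p0_p1 (kv : String × List (String × Bool)) : ¬(pvP0 kv = true ∧ pvP1 kv = true) := by
  rintro ⟨h0, h1⟩
  simp only [pvP0, pvP1, Bool.and_eq_true, Bool.not_eq_true'] at h0 h1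
  rw [h0.2] at h1
  exact absurd h1.2 (by simp)

-- sorted-by-name of a nodup-keys list is strictly increasing in the name
theorem pvSorted_strict (l : List (String × List (String × Bool))) (h : (l.map Prod.fst).Nodup) :
    (PySem.List.sorted l (fun kv => kv.1) false).Pairwise (fun a b => a.1 < b.1) := by
  have hle := PySem.List.sorted_pairwise l (fun kv => kv.1)
  have hperm := (PySem.List.sorted_perm l (fun kv => kv.1) false).map Prod.fst
  have hnd : ((PySem.List.sorted l (fun kv => kv.1) false).map Prod.fst).Nodup :=
    (hperm.nodup_iff).mpr h
  have hne : (PySem.List.sorted l (fun kv => kv.1) false).Pairwise (fun a b => a.1 ≠ b.1) :=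
    (List.pairwise_map).mp hnd
  exact (hle.and hne).imp (fun h => lt_of_le_of_ne h.1 h.2)

-- abbreviation used only in the proofs below
def pvP2 (kv : String × List (String × Bool)) : Bool := !(pvP0 kv) && !(pvP1 kv)

theorem pvRank_p2' (kv : String × List (String × Bool)) (h : pvP2 kv = true) : pvRank kv.2 = 2 :=
  pvRank_p2 kv h

-- ===== VERDICT (by name: the statement is the Claim_ definition above) =====
theorem sort_config_spec : Claim_equal_sort_config := by
  intro options _hdom hpre
  unfold Spec_sort_config
  obtain ⟨hnd, -⟩ := hpre
  have hinj : ∀ a ∈ options, ∀ b ∈ options, a.1 = b.1 → a = b := fun a ha b hb h =>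
    List.inj_on_of_nodup_map hnd ha hb h
  have hnd0 : ((options.filter pvP0).map Prod.fst).Nodup :=
    List.Nodup.sublist (List.Sublist.map Prod.fst List.filter_sublist) hnd
  have hnd1 : ((options.filter pvP1).map Prod.fst).Nodup :=
    List.Nodup.sublist (List.Sublist.map Prod.fst List.filter_sublist) hnd
  have hnd2 : ((options.filter pvP2).map Prod.fst).Nodup :=
    List.Nodup.sublist (List.Sublist.map Prod.fst List.filter_sublist) hnd
  have hmem : ∀ (p : (String × List (String × Bool)) → Bool), ∀ kv ∈ options,
      (kv.1 ∈ (options.filter p).map Prod.fst ↔ p kv = true) := by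
    intro p kv hkv
    constructor
    · intro h
      obtain ⟨kv', hkv', he⟩ := List.mem_map.mp h
      obtain ⟨hkv'o, hpkv'⟩ := List.mem_filter.mp hkv'
      have he' := hinj kv' hkv'o kv hkv he
      rwa [he'] at hpkv'
    · intro h
      exact List.mem_map_of_mem (List.mem_filter.mpr ⟨hkv, h⟩)
  have hcont : ∀ (p : (String × List (String × Bool)) → Bool),
      ((options.filter p).map Prod.fst).Nodup → ∀ (x : String),
      ((PySem.Dict.ofList (options.filter p)).contains x = true ↔
        x ∈ (options.filter p).map Prod.fst) := by
    intro p hp x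
    rw [PySem.Dict.contains_eq_decide_mem_keys]
    simp [PySem.Dict.keys, pvOfList_items _ hp]
  have hfilter3 : options.filter (fun kv =>
      !((PySem.Dict.ofList (options.filter pvP0)).contains kv.1) &&
      !((PySem.Dict.ofList (options.filter pvP1)).contains kv.1)) = options.filter pvP2 := by
    refine List.filter_congr ?_
    intro kv hkv
    have e0 : (PySem.Dict.ofList (options.filter pvP0)).contains kv.1 = pvP0 kv := by
      rw [Bool.eq_iff_iff, hcont pvP0 hnd0 kv.1, hmem pvP0 kv hkv]
    have e1 : (PySem.Dict.ofList (options.filter pvP1)).contains kv.1 = pvP1 kv := by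
      rw [Bool.eq_iff_iff, hcont pvP1 hnd1 kv.1, hmem pvP1 kv hkv]
    rw [e0, e1]
    rfl
  -- the three sorted blocks
  have q0 := PySem.List.sorted_perm (options.filter pvP0) (fun kv => kv.1) false
  have q1 := PySem.List.sorted_perm (options.filter pvP1) (fun kv => kv.1) false
  have q2 := PySem.List.sorted_perm (options.filter pvP2) (fun kv => kv.1) false
  have hsnd0 : ((PySem.List.sorted (options.filter pvP0) (fun kv => kv.1) false).map Prod.fst).Nodup :=
    ((q0.map Prod.fst).nodup_iff).mpr hnd0
  have hsnd1 : ((PySem.List.sorted (options.filter pvP1) (fun kv => kv.1) false).map Prod.fst).Nodup :=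
    ((q1.map Prod.fst).nodup_iff).mpr hnd1
  have hsnd2 : ((PySem.List.sorted (options.filter pvP2) (fun kv => kv.1) false).map Prod.fst).Nodup :=
    ((q2.map Prod.fst).nodup_iff).mpr hnd2
  have hmem_s : ∀ (p : (String × List (String × Bool)) → Bool),
      ∀ q ∈ PySem.List.sorted (options.filter p) (fun kv => kv.1) false,
      q ∈ options ∧ p q = true := by
    intro p q hq
    exact List.mem_filter.mp ((PySem.List.mem_sorted _ _ _ _).mp hq)
  -- A's dict-building: three updates over fresh keys append
  have hi0 : (PySem.Dict.empty.update
      (PySem.List.sorted (options.filter pvP0) (fun kv => kv.1) false)).items =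
      PySem.List.sorted (options.filter pvP0) (fun kv => kv.1) false := by
    rw [pvUpdate_items _ _ (by intro p _; simp [PySem.Dict.empty]) hsnd0]
    simp [PySem.Dict.empty]
  have hc0 : ∀ x : String, ((PySem.Dict.empty.update
      (PySem.List.sorted (options.filter pvP0) (fun kv => kv.1) false)).contains x = true ↔
      x ∈ (PySem.List.sorted (options.filter pvP0) (fun kv => kv.1) false).map Prod.fst) := by
    intro x
    rw [PySem.Dict.contains_eq_decide_mem_keys]
    simp [PySem.Dict.keys, hi0]
  have hf1 : ∀ q ∈ PySem.List.sorted (options.filter pvP1) (fun kv => kv.1) false,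
      (PySem.Dict.empty.update
        (PySem.List.sorted (options.filter pvP0) (fun kv => kv.1) false)).contains q.1 = false := by
    intro q hq
    rw [Bool.eq_false_iff]
    intro hct
    obtain ⟨q', hq', he⟩ := List.mem_map.mp ((hc0 q.1).mp hct)
    obtain ⟨hq'o, hp0⟩ := hmem_s pvP0 q' hq'
    obtain ⟨hqo, hp1⟩ := hmem_s pvP1 q hq
    have := hinj q' hq'o q hqo he
    rw [this] at hp0
    exact pvNot_p0_p1 q ⟨hp0, hp1⟩
  have hi1 : ((PySem.Dict.empty.update
      (PySem.List.sorted (options.filter pvP0) (fun kv => kv.1) false)).update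
      (PySem.List.sorted (options.filter pvP1) (fun kv => kv.1) false)).items =
      PySem.List.sorted (options.filter pvP0) (fun kv => kv.1) false ++
      PySem.List.sorted (options.filter pvP1) (fun kv => kv.1) false := by
    rw [pvUpdate_items _ _ hf1 hsnd1, hi0]
  have hc1 : ∀ x : String, (((PySem.Dict.empty.update
      (PySem.List.sorted (options.filter pvP0) (fun kv => kv.1) false)).update
      (PySem.List.sorted (options.filter pvP1) (fun kv => kv.1) false)).contains x = true ↔
      x ∈ (PySem.List.sorted (options.filter pvP0) (fun kv => kv.1) false ++
        PySem.List.sorted (options.filter pvP1) (fun kv => kv.1) false).map Prod.fst) := by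
    intro x
    rw [PySem.Dict.contains_eq_decide_mem_keys]
    simp [PySem.Dict.keys, hi1]
  have hf2 : ∀ q ∈ PySem.List.sorted (options.filter pvP2) (fun kv => kv.1) false,
      ((PySem.Dict.empty.update
        (PySem.List.sorted (options.filter pvP0) (fun kv => kv.1) false)).update
        (PySem.List.sorted (options.filter pvP1) (fun kv => kv.1) false)).contains q.1 = false := by
    intro q hq
    rw [Bool.eq_false_iff]
    intro hct
    obtain ⟨hqo, hp2⟩ := hmem_s pvP2 q hq
    have hx := (hc1 q.1).mp hct
    rw [List.map_append, List.mem_append] at hx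
    simp only [pvP2, Bool.and_eq_true, Bool.not_eq_true'] at hp2
    rcases hx with hx | hx
    · obtain ⟨q', hq', he⟩ := List.mem_map.mp hx
      obtain ⟨hq'o, hp0⟩ := hmem_s pvP0 q' hq'
      have := hinj q' hq'o q hqo he
      rw [this] at hp0
      rw [hp2.1] at hp0
      exact absurd hp0 (by simp)
    · obtain ⟨q', hq', he⟩ := List.mem_map.mp hx
      obtain ⟨hq'o, hp1⟩ := hmem_s pvP1 q' hq'
      have := hinj q' hq'o q hqo he
      rw [this] at hp1
      rw [hp2.2] at hp1
      exact absurd hp1 (by simp)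
  have hA : sort_config options =
      PySem.List.sorted (options.filter pvP0) (fun kv => kv.1) false ++
      PySem.List.sorted (options.filter pvP1) (fun kv => kv.1) false ++
      PySem.List.sorted (options.filter pvP2) (fun kv => kv.1) false := by
    simp only [sort_config]
    rw [hfilter3]
    rw [pvOfList_items _ hnd0, pvOfList_items _ hnd1, pvOfList_items _ hnd2]
    rw [pvUpdate_items _ _ hf2 hsnd2, hi1]
  -- B's single sort
  have hpermB := PySem.List.sorted2_perm options (fun kv => pvRank kv.2) (fun kv => kv.1) false
  have hB : sort_config_alt options =
      PySem.List.sorted2 options (fun kv => pvRank kv.2) (fun kv => kv.1) false := by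
    unfold sort_config_alt
    exact pvOfList_items _ (((hpermB.map Prod.fst).nodup_iff).mpr hnd)
  rw [hA, hB]
  -- the strictly (rank, name)-increasing concatenation IS the single sort
  refine (pvSorted2_eq options _ (fun kv => pvRank kv.2) (fun kv => kv.1) ?_ ?_
    (fun a ha b hb h => hinj a ha b hb h)).symm
  · -- permutation
    have e1 : (options.filter (fun x => !(pvP0 x))).filter pvP1 = options.filter pvP1 := by
      rw [List.filter_filter]
      refine List.filter_congr ?_
      intro kv _
      cases h1 : pvP1 kv <;> cases h0 : pvP0 kv <;> simp
      exact absurd ⟨h0, h1⟩ (pvNot_p0_p1 kv)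
    have e2 : (options.filter (fun x => !(pvP0 x))).filter (fun x => !(pvP1 x)) =
        options.filter pvP2 := by
      rw [List.filter_filter]
      refine List.filter_congr ?_
      intro kv _
      simp [pvP2, Bool.and_comm]
    have h2 := List.filter_append_perm pvP1 (options.filter (fun x => !(pvP0 x)))
    rw [e1, e2] at h2
    have hpart : (options.filter pvP0 ++ (options.filter pvP1 ++ options.filter pvP2)).Perm
        options :=
      ((h2.append_left (options.filter pvP0)).trans (List.filter_append_perm pvP0 options))
    have happ := (q0.append q1).append q2
    rw [← List.append_assoc] at hpart
    exact happ.trans hpart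
  · -- pairwise strict (rank, name) order
    have hw0 := (pvSorted_strict (options.filter pvP0) hnd0).imp_of_mem
      (fun {a b} ha hb hlt => (pvLex_true_iff (fun kv => pvRank kv.2) (fun kv => kv.1) a b).mpr
        (Or.inr ⟨by rw [pvRank_p0 a (hmem_s pvP0 a ha).2, pvRank_p0 b (hmem_s pvP0 b hb).2], hlt⟩))
    have hw1 := (pvSorted_strict (options.filter pvP1) hnd1).imp_of_mem
      (fun {a b} ha hb hlt => (pvLex_true_iff (fun kv => pvRank kv.2) (fun kv => kv.1) a b).mpr
        (Or.inr ⟨by rw [pvRank_p1 a (hmem_s pvP1 a ha).2, pvRank_p1 b (hmem_s pvP1 b hb).2], hlt⟩))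
    have hw2 := (pvSorted_strict (options.filter pvP2) hnd2).imp_of_mem
      (fun {a b} ha hb hlt => (pvLex_true_iff (fun kv => pvRank kv.2) (fun kv => kv.1) a b).mpr
        (Or.inr ⟨by rw [pvRank_p2' a (hmem_s pvP2 a ha).2, pvRank_p2' b (hmem_s pvP2 b hb).2], hlt⟩))
    rw [List.pairwise_append]
    refine ⟨?_, hw2, ?_⟩
    · rw [List.pairwise_append]
      refine ⟨hw0, hw1, ?_⟩
      intro a ha b hb
      refine (pvLex_true_iff (fun kv => pvRank kv.2) (fun kv => kv.1) a b).mpr (Or.inl ?_)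
      rw [pvRank_p0 a (hmem_s pvP0 a ha).2, pvRank_p1 b (hmem_s pvP1 b hb).2]
      norm_num
    · intro a ha b hb
      refine (pvLex_true_iff (fun kv => pvRank kv.2) (fun kv => kv.1) a b).mpr (Or.inl ?_)
      rw [List.mem_append] at ha
      rw [pvRank_p2' b (hmem_s pvP2 b hb).2]
      rcases ha with ha | ha
      · rw [pvRank_p0 a (hmem_s pvP0 a ha).2]; norm_num
      · rw [pvRank_p1 a (hmem_s pvP1 a ha).2]; norm_num
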